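-- pv_equiv track=rewrite | github.com/Hirotaka-Akihiro/i23-2538-NLP-Assignment | scripts/part2_sequence_labeling.py | build_seed_gazetteer
-- ===== SOURCE A (Python) =====
-- from collections import Counter, defaultdict
-- from typing import Dict, List, Sequence, Tuple
--
-- def build_seed_gazetteer(docs: Sequence[Sequence[str]]) -> Dict[str, set]:
--     freq = Counter(tok.lower() for doc in docs for tok in doc)
--     ranked = [w for w, _ in freq.most_common() if w.isalpha()]
--
--     persons = {
--         "imran", "nawaz", "bilawal", "maryam", "shehbaz", "asif", "fawad", "hamza", "ahsan", "shahbaz",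
--         "ali", "ahmed", "hassan", "hussain", "fatima", "ayesha", "sana", "zara", "usman", "farhan",
--         "saad", "noman", "zubair", "waqas", "arslan", "rizwan", "kashif", "adnan", "yasir", "danish",
--         "mahnoor", "sadia", "hina", "saba", "amna", "sidra", "rabia", "samina", "khadija", "sumaira",
--         "talha", "hamid", "sarfaraz", "kamran", "iftikhar", "haris", "babar", "shaheen", "fakhar", "sarim",
--     }
--     locations = {
--         "lahore", "karachi", "islamabad", "peshawar", "quetta", "multan", "faisalabad", "hyderabad", "sialkot", "gujranwala",
--         "punjab", "sindh", "kpk", "balochistan", "gilgit", "skardu", "swat", "hunza", "thar", "cholistan",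
--         "rawalpindi", "bahawalpur", "sukkur", "larkana", "mirpur", "muzaffarabad", "kasur", "narowal", "mansehra", "abbottabad",
--         "dera", "chitral", "mardan", "kohat", "gwadar", "turbat", "ziarat", "khuzdar", "nowshera", "jhelum",
--         "attock", "chakwal", "okara", "vehari", "rajanpur", "sahiwal", "charsadda", "dir", "hangu", "swabi",
--     }
--     orgs = {
--         "pti", "pmln", "ppp", "ecp", "nab", "fia", "isi", "pcb", "psl", "statebank",
--         "fbr", "wapda", "ogdcl", "pia", "pemra", "nadra", "suparco", "hec", "lums", "nust",
--         "uet", "iba", "aku", "edhi", "who", "unicef", "un", "imf", "worldbank", "icc",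
--     }
--     misc = {
--         "eid", "ramzan", "budget", "monsoon", "vaccine", "festival", "summit", "policy", "education", "sehat",
--         "taleem", "aabadi", "flood", "inflation", "trade", "cricket", "hockey", "dengue", "malaria", "earthquake",
--         "covid", "gdp", "exports", "imports", "election", "verdict", "hearing", "camp", "relief", "scholarship",
--     }
--
--     def fill_set(target: set, target_size: int, used: set) -> None:
--         for w in ranked:
--             if w in used:
--                 continue
--             target.add(w)
--             used.add(w)
--             if len(target) >= target_size:
--                 break
--
--     used_all: set = set(persons)
--     fill_set(persons, 50, used_all)
--     fill_set(locations, 50, used_all)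
--     fill_set(orgs, 30, used_all)
--     fill_set(misc, 30, used_all)
--
--     return {"PER": persons, "LOC": locations, "ORG": orgs, "MISC": misc}
-- ===== SOURCE B (Python) =====
-- from collections import Counter
--
-- # Seed vocabularies as whitespace-separated strings (one idiomatic `split` each).
-- _PER = ("imran nawaz bilawal maryam shehbaz asif fawad hamza ahsan shahbaz "
--         "ali ahmed hassan hussain fatima ayesha sana zara usman farhan "
--         "saad noman zubair waqas arslan rizwan kashif adnan yasir danish "
--         "mahnoor sadia hina saba amna sidra rabia samina khadija sumaira "
--         "talha hamid sarfaraz kamran iftikhar haris babar shaheen fakhar sarim")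
-- _LOC = ("lahore karachi islamabad peshawar quetta multan faisalabad hyderabad sialkot gujranwala "
--         "punjab sindh kpk balochistan gilgit skardu swat hunza thar cholistan "
--         "rawalpindi bahawalpur sukkur larkana mirpur muzaffarabad kasur narowal mansehra abbottabad "
--         "dera chitral mardan kohat gwadar turbat ziarat khuzdar nowshera jhelum "
--         "attock chakwal okara vehari rajanpur sahiwal charsadda dir hangu swabi")
-- _ORG = ("pti pmln ppp ecp nab fia isi pcb psl statebank "
--         "fbr wapda ogdcl pia pemra nadra suparco hec lums nust "
--         "uet iba aku edhi who unicef un imf worldbank icc")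
-- _MISC = ("eid ramzan budget monsoon vaccine festival summit policy education sehat "
--          "taleem aabadi flood inflation trade cricket hockey dengue malaria earthquake "
--          "covid gdp exports imports election verdict hearing camp relief scholarship")
--
--
-- def build_seed_gazetteer(docs):
--     freq = Counter(tok.lower() for doc in docs for tok in doc)
--     ranked = [w for w, _ in freq.most_common() if w.isalpha()]
--
--     persons = set(_PER.split())
--     # one shared lazy pool, filtered once against the persons seed; each
--     # category consumes it from where the previous one stopped
--     pool = iter(w for w in ranked if w not in persons)
--     out = {}
--     for name, target, size in (("PER", persons, 50),
--                                ("LOC", set(_LOC.split()), 50),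
--                                ("ORG", set(_ORG.split()), 30),
--                                ("MISC", set(_MISC.split()), 30)):
--         for w in pool:
--             target.add(w)
--             if len(target) >= size:
--                 break
--         out[name] = target
--     return out
-- ===== Notes on version B (the rewrite author's own statement) =====
-- stated objective: simpler
-- what changed: A rescans the ranked list from the start for each of the four categories while threading an accumulating 'used' set; B filters the ranked list once against the persons seed into one shared lazy pool that a single loop over (name, seed, size) category descriptors consumes in sequence, building the result dict in the same loop and dropping the 'used' set and the fill_set helper entirely.
import Mathlib
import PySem

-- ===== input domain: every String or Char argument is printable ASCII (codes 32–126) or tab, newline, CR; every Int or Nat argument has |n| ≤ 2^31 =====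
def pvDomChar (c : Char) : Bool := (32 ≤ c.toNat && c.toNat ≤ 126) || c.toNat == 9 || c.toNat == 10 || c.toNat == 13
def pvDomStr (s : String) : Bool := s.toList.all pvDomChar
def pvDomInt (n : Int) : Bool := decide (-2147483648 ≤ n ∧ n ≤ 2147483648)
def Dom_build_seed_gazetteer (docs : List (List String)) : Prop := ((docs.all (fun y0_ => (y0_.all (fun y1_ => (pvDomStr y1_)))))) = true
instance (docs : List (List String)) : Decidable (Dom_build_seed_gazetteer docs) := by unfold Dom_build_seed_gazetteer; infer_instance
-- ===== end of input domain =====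

-- B replaces A's four from-start rescans of `ranked` (with an accumulating `used` set and a
-- fill_set helper) by one shared pool, filtered once against the persons seed, consumed in
-- sequence by a single loop over (name, seed-string, size) category descriptors whose seed
-- sets come from whitespace-split string constants (objective: simpler decomposition).


-- ===== PORT A =====
def pvPersons : PySem.Set String := PySem.Set.ofList [
  "imran", "nawaz", "bilawal", "maryam", "shehbaz", "asif", "fawad", "hamza", "ahsan", "shahbaz",
  "ali", "ahmed", "hassan", "hussain", "fatima", "ayesha", "sana", "zara", "usman", "farhan",
  "saad", "noman", "zubair", "waqas", "arslan", "rizwan", "kashif", "adnan", "yasir", "danish",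
  "mahnoor", "sadia", "hina", "saba", "amna", "sidra", "rabia", "samina", "khadija", "sumaira",
  "talha", "hamid", "sarfaraz", "kamran", "iftikhar", "haris", "babar", "shaheen", "fakhar", "sarim"]
def pvLocations : PySem.Set String := PySem.Set.ofList [
  "lahore", "karachi", "islamabad", "peshawar", "quetta", "multan", "faisalabad", "hyderabad", "sialkot", "gujranwala",
  "punjab", "sindh", "kpk", "balochistan", "gilgit", "skardu", "swat", "hunza", "thar", "cholistan",
  "rawalpindi", "bahawalpur", "sukkur", "larkana", "mirpur", "muzaffarabad", "kasur", "narowal", "mansehra", "abbottabad",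
  "dera", "chitral", "mardan", "kohat", "gwadar", "turbat", "ziarat", "khuzdar", "nowshera", "jhelum",
  "attock", "chakwal", "okara", "vehari", "rajanpur", "sahiwal", "charsadda", "dir", "hangu", "swabi"]
def pvOrgs : PySem.Set String := PySem.Set.ofList [
  "pti", "pmln", "ppp", "ecp", "nab", "fia", "isi", "pcb", "psl", "statebank",
  "fbr", "wapda", "ogdcl", "pia", "pemra", "nadra", "suparco", "hec", "lums", "nust",
  "uet", "iba", "aku", "edhi", "who", "unicef", "un", "imf", "worldbank", "icc"]
def pvMisc : PySem.Set String := PySem.Set.ofList [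
  "eid", "ramzan", "budget", "monsoon", "vaccine", "festival", "summit", "policy", "education", "sehat",
  "taleem", "aabadi", "flood", "inflation", "trade", "cricket", "hockey", "dengue", "malaria", "earthquake",
  "covid", "gdp", "exports", "imports", "election", "verdict", "hearing", "camp", "relief", "scholarship"]

-- ranked = [w for w, _ in Counter(tok.lower() …).most_common() if w.isalpha()]
-- (most_common() = sorted(items, key=count, reverse=True), stable); identical line in both Pythons
def pvRanked (docs : List (List String)) : List String :=
  let toks := docs.flatMap (fun doc => doc.map PySem.Str.lower)
  let freq := PySem.Dict.counter toks
  ((PySem.List.sorted freq.items (fun p => p.2) true).map (fun p => p.1)).filter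
    (fun w => PySem.Str.strIsalpha w)

-- A's fill_set: scan ranked from the start, skipping `used`, adding to target and used,
-- breaking once len(target) >= size; returns the (target, used) pair A mutates in place
def pvFillA : List String → PySem.Set String → Nat → PySem.Set String → PySem.Set String × PySem.Set String
  | [], target, _, used => (target, used)
  | w :: ws, target, size, used =>
    if PySem.Set.contains used w then pvFillA ws target size used
    else
      let t := PySem.Set.add target w
      let u := PySem.Set.add used w
      if size ≤ t.length then (t, u) else pvFillA ws t size u

def build_seed_gazetteer (docs : List (List String)) : List (String × List String) :=
  let ranked := pvRanked docs
  let r1 := pvFillA ranked pvPersons 50 pvPersons      -- used_all = set(persons)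
  let r2 := pvFillA ranked pvLocations 50 r1.2
  let r3 := pvFillA ranked pvOrgs 30 r2.2
  let r4 := pvFillA ranked pvMisc 30 r3.2
  [("PER", r1.1), ("LOC", r2.1), ("ORG", r3.1), ("MISC", r4.1)]

-- ===== PORT B =====
-- seed vocabularies as whitespace-separated strings (Source B's _PER/_LOC/_ORG/_MISC)
def pvStrPER : String := "imran nawaz bilawal maryam shehbaz asif fawad hamza ahsan shahbaz ali ahmed hassan hussain fatima ayesha sana zara usman farhan saad noman zubair waqas arslan rizwan kashif adnan yasir danish mahnoor sadia hina saba amna sidra rabia samina khadija sumaira talha hamid sarfaraz kamran iftikhar haris babar shaheen fakhar sarim"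
def pvStrLOC : String := "lahore karachi islamabad peshawar quetta multan faisalabad hyderabad sialkot gujranwala punjab sindh kpk balochistan gilgit skardu swat hunza thar cholistan rawalpindi bahawalpur sukkur larkana mirpur muzaffarabad kasur narowal mansehra abbottabad dera chitral mardan kohat gwadar turbat ziarat khuzdar nowshera jhelum attock chakwal okara vehari rajanpur sahiwal charsadda dir hangu swabi"
def pvStrORG : String := "pti pmln ppp ecp nab fia isi pcb psl statebank fbr wapda ogdcl pia pemra nadra suparco hec lums nust uet iba aku edhi who unicef un imf worldbank icc"
def pvStrMISC : String := "eid ramzan budget monsoon vaccine festival summit policy education sehat taleem aabadi flood inflation trade cricket hockey dengue malaria earthquake covid gdp exports imports election verdict hearing camp relief scholarship"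

-- set(s.split())
def pvSeedOf (s : String) : PySem.Set String := PySem.Set.ofList (PySem.Str.split₀ s)

-- B's inner `for w in pool`: consume the shared pool into target until len(target) >= size,
-- returning the grown set and the unconsumed remainder of the pool
def pvTake : List String → PySem.Set String → Nat → PySem.Set String × List String
  | [], target, _ => (target, [])
  | w :: ws, target, size =>
    let t := PySem.Set.add target w
    if size ≤ t.length then (t, ws) else pvTake ws t size

-- B's outer loop over (name, target, size) descriptors, threading the pool and
-- building the output dict in loop order
def pvDraw : List (String × PySem.Set String × Nat) → List String → List (String × List String)
  | [], _ => []
  | (name, target, size) :: rest, pool =>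
    let r := pvTake pool target size
    (name, r.1) :: pvDraw rest r.2

def build_seed_gazetteer_alt (docs : List (List String)) : List (String × List String) :=
  let ranked := pvRanked docs
  let persons := pvSeedOf pvStrPER
  let pool := ranked.filter (fun w => !PySem.Set.contains persons w)
  pvDraw [("PER", persons, 50), ("LOC", pvSeedOf pvStrLOC, 50),
          ("ORG", pvSeedOf pvStrORG, 30), ("MISC", pvSeedOf pvStrMISC, 30)] pool

-- ===== PRECONDITION & SPEC =====
def Spec_build_seed_gazetteer (docs : List (List String)) (out : List (String × List String)) : Prop := out = build_seed_gazetteer_alt docs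
instance (docs : List (List String)) (out : List (String × List String)) : Decidable (Spec_build_seed_gazetteer docs out) := by unfold Spec_build_seed_gazetteer; infer_instance

-- ===== CLAIM (what is proved, stated in full; the proofs are below) =====
def Claim_equal_build_seed_gazetteer : Prop := ∀ (docs : List (List String)), Dom_build_seed_gazetteer docs → Spec_build_seed_gazetteer docs (build_seed_gazetteer docs)

-- ===== LEMMAS AND PROOFS =====

-- B's split-derived seed sets are A's literal seed sets
set_option maxRecDepth 10000 in
theorem pvSeed_PER : pvSeedOf pvStrPER = pvPersons := by decide
set_option maxRecDepth 10000 in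
theorem pvSeed_LOC : pvSeedOf pvStrLOC = pvLocations := by decide
set_option maxRecDepth 10000 in
theorem pvSeed_ORG : pvSeedOf pvStrORG = pvOrgs := by decide
set_option maxRecDepth 10000 in
theorem pvSeed_MISC : pvSeedOf pvStrMISC = pvMisc := by decide

-- membership in `used` survives pvFillA (used only grows)
theorem pvFillA_used_mono (ranked : List String) (target : PySem.Set String) (size : Nat)
    (used : PySem.Set String) (x : String) (hx : x ∈ used) : x ∈ (pvFillA ranked target size used).2 := by
  induction ranked generalizing target used with
  | nil => exact hx
  | cons w ws ih =>
    simp only [pvFillA]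
    split
    · exact ih _ _ hx
    · have hx' : x ∈ PySem.Set.add used w := (PySem.Set.mem_add used w x).mpr (Or.inl hx)
      split
      · exact hx'
      · exact ih _ _ hx'

theorem pvFilter_not_contains_add (ws : List String) (used : PySem.Set String) (w : String)
    (hw : w ∉ ws) :
    ws.filter (fun x => !PySem.Set.contains (PySem.Set.add used w) x)
      = ws.filter (fun x => !PySem.Set.contains used x) := by
  apply List.filter_congr
  intro x hx
  have hne : x ≠ w := fun h => hw (h ▸ hx)
  simp [PySem.Set.mem_add, hne]

-- the key correspondence: B's single pass over the pool of not-yet-used ranked words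
-- computes A's (target, used) scan, and leaves exactly the not-yet-used words as remainder
theorem pvTake_filter_eq_pvFillA (ranked : List String) (hnd : ranked.Nodup) :
    ∀ (target used : PySem.Set String) (size : Nat),
    pvTake (ranked.filter (fun w => !PySem.Set.contains used w)) target size
      = ((pvFillA ranked target size used).1,
         ranked.filter (fun w => !PySem.Set.contains (pvFillA ranked target size used).2 w)) := by
  induction ranked with
  | nil => intro target used size; simp [pvTake, pvFillA]
  | cons w ws ih =>
    have hw : w ∉ ws := (List.nodup_cons.mp hnd).1
    have hnd' : ws.Nodup := (List.nodup_cons.mp hnd).2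
    intro target used size
    by_cases hmem : w ∈ used
    · -- A skips w; it is absent from B's pool as well
      have hm2 := pvFillA_used_mono ws target size used w hmem
      have e1 : (w :: ws).filter (fun x => !PySem.Set.contains used x)
          = ws.filter (fun x => !PySem.Set.contains used x) := by simp [hmem]
      have e2 : pvFillA (w :: ws) target size used = pvFillA ws target size used := by
        simp [pvFillA, hmem]
      have e4 : (w :: ws).filter (fun x => !PySem.Set.contains (pvFillA ws target size used).2 x)
          = ws.filter (fun x => !PySem.Set.contains (pvFillA ws target size used).2 x) := by
        simp [hm2]
      rw [e1, e2, e4]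
      exact ih hnd' target used size
    · have hwadd : w ∈ PySem.Set.add used w := (PySem.Set.mem_add used w w).mpr (Or.inr rfl)
      have e1 : (w :: ws).filter (fun x => !PySem.Set.contains used x)
          = w :: ws.filter (fun x => !PySem.Set.contains used x) := by simp [hmem]
      by_cases hsz : size ≤ (PySem.Set.add target w).length
      · -- target reached size: both stop; remainder is ws minus the words in used ∪ {w}
        have e2 : pvFillA (w :: ws) target size used
            = (PySem.Set.add target w, PySem.Set.add used w) := by simp [pvFillA, hmem, hsz]
        have e3 : pvTake (w :: ws.filter (fun x => !PySem.Set.contains used x)) target size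
            = (PySem.Set.add target w, ws.filter (fun x => !PySem.Set.contains used x)) := by
          simp [pvTake, hsz]
        have e4 : (w :: ws).filter (fun x => !PySem.Set.contains (PySem.Set.add used w) x)
            = ws.filter (fun x => !PySem.Set.contains (PySem.Set.add used w) x) := by
          simp
        rw [e1, e3, e2, e4, pvFilter_not_contains_add ws used w hw]
      · -- keep scanning with the grown target and used
        have hm2 := pvFillA_used_mono ws (PySem.Set.add target w) size (PySem.Set.add used w) w hwadd
        have e2 : pvFillA (w :: ws) target size used
            = pvFillA ws (PySem.Set.add target w) size (PySem.Set.add used w) := by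
          simp [pvFillA, hmem, hsz]
        have e3 : ∀ l, pvTake (w :: l) target size = pvTake l (PySem.Set.add target w) size := by
          intro l; simp [pvTake, hsz]
        have e4 : (w :: ws).filter (fun x =>
              !PySem.Set.contains (pvFillA ws (PySem.Set.add target w) size (PySem.Set.add used w)).2 x)
            = ws.filter (fun x =>
              !PySem.Set.contains (pvFillA ws (PySem.Set.add target w) size (PySem.Set.add used w)).2 x) := by
          simp [hm2]
        rw [e1, e3, e2, e4, ← pvFilter_not_contains_add ws used w hw]
        exact ih hnd' (PySem.Set.add target w) (PySem.Set.add used w) size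

theorem pvRanked_nodup (docs : List (List String)) : (pvRanked docs).Nodup := by
  unfold pvRanked
  apply List.Nodup.filter
  have hperm := (PySem.List.sorted_perm (PySem.Dict.counter
      (docs.flatMap (fun doc => doc.map PySem.Str.lower))).items (fun p => p.2) true).map (fun p => p.1)
  refine hperm.nodup_iff.mpr ?_
  have hk := PySem.Dict.nodup_keys_counter (docs.flatMap (fun doc => doc.map PySem.Str.lower))
  simpa [PySem.Dict.keys] using hk

-- ===== VERDICT (by name: the statement is the Claim_ definition above) =====
theorem build_seed_gazetteer_spec : Claim_equal_build_seed_gazetteer := by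
  intro docs _
  show build_seed_gazetteer docs = build_seed_gazetteer_alt docs
  have hnd := pvRanked_nodup docs
  have h1 := pvTake_filter_eq_pvFillA (pvRanked docs) hnd pvPersons pvPersons 50
  have h2 := pvTake_filter_eq_pvFillA (pvRanked docs) hnd pvLocations
      (pvFillA (pvRanked docs) pvPersons 50 pvPersons).2 50
  have h3 := pvTake_filter_eq_pvFillA (pvRanked docs) hnd pvOrgs
      (pvFillA (pvRanked docs) pvLocations 50 (pvFillA (pvRanked docs) pvPersons 50 pvPersons).2).2 30
  have h4 := pvTake_filter_eq_pvFillA (pvRanked docs) hnd pvMisc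
      (pvFillA (pvRanked docs) pvOrgs 30
        (pvFillA (pvRanked docs) pvLocations 50 (pvFillA (pvRanked docs) pvPersons 50 pvPersons).2).2).2 30
  simp only [build_seed_gazetteer, build_seed_gazetteer_alt, pvDraw,
    pvSeed_PER, pvSeed_LOC, pvSeed_ORG, pvSeed_MISC]
  rw [h1, h2, h3, h4]
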